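-- pv_equiv track=rewrite | github.com/quadrismegistus/generative-formalism | generative_formalism.py | limit_lines
-- ===== SOURCE A (Python) =====
-- def limit_lines(txt, n=100):
--     l=[]
--     n0=0
--     for line in txt.strip().split('\n'):
--         if line.strip():
--             n0+=1
--         l.append(line)
--         if n0>=n:
--             break
--     return '\n'.join(l).strip()
-- ===== SOURCE B (Python) =====
-- def limit_lines(txt, n=100):
--     lines = txt.strip().split('\n')
--     counts = []
--     c = 0
--     for line in lines:
--         if line.strip():
--             c += 1
--         counts.append(c)
--     cut = next((i + 1 for i, c in enumerate(counts) if c >= n), len(lines))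
--     return '\n'.join(lines[:cut]).strip()
-- ===== Notes on version B (the rewrite author's own statement) =====
-- stated objective: alternative
-- what changed: Replaces A's single stateful loop that appends lines and breaks early by a prefix-count decomposition: compute the running count of non-empty lines, find the first index where it reaches n, and slice the line list there.
import Mathlib
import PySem

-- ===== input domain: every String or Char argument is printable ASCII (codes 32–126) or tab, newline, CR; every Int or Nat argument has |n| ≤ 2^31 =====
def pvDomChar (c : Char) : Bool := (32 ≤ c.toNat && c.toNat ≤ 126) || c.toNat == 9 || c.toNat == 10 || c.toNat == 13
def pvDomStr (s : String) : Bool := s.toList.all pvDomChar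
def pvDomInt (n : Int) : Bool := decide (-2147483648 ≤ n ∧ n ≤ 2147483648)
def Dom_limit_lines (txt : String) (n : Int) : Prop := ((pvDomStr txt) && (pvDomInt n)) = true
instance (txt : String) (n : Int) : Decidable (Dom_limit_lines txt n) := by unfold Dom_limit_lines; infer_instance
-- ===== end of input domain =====

-- B replaces A's stateful append-and-break loop by a prefix-count-then-slice decomposition (same cost): equal on all inputs.


-- ===== PORT A =====
-- A's for-loop: count non-empty lines, append each line, break once n0 >= n
def limLoopA (n : Int) : List String → List String → Int → List String
  | [], l, _ => l
  | line :: rest, l, n0 =>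
    let n0' := if PySem.Str.strip line ≠ "" then n0 + 1 else n0
    let l' := l ++ [line]
    if n0' ≥ n then l' else limLoopA n rest l' n0'

-- txt.strip().split('\n'): split? is some since the separator "\n" is non-empty (getD [] is never taken)
def limit_lines (txt : String) (n : Int) : String :=
  PySem.Str.strip (PySem.Str.join "\n"
    (limLoopA n ((PySem.Str.split? (PySem.Str.strip txt) "\n").getD []) [] 0))

-- ===== PORT B =====
-- B's first loop: build the running counts of non-empty lines
def countsLoopB : List String → List Int → Int → List Int
  | [], counts, _ => counts
  | line :: rest, counts, c =>
    let c' := if PySem.Str.strip line ≠ "" then c + 1 else c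
    countsLoopB rest (counts ++ [c']) c'

-- B's next((i + 1 for i, c in enumerate(counts) if c >= n), default)
def firstCutB (n : Int) : List Int → Int → Option Int
  | [], _ => none
  | c :: cs, i => if c ≥ n then some (i + 1) else firstCutB n cs (i + 1)

def limit_lines_alt (txt : String) (n : Int) : String :=
  let lines := (PySem.Str.split? (PySem.Str.strip txt) "\n").getD []   -- split? some: sep "\n" ≠ ""
  let counts := countsLoopB lines [] 0
  let cut := (firstCutB n counts 0).getD (lines.length : Int)
  PySem.Str.strip (PySem.Str.join "\n" (PySem.List.slice lines none (some cut)))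

-- ===== PRECONDITION & SPEC =====
def Spec_limit_lines (txt : String) (n : Int) (out : String) : Prop := out = limit_lines_alt txt n
instance (txt : String) (n : Int) (out : String) : Decidable (Spec_limit_lines txt n out) := by unfold Spec_limit_lines; infer_instance

-- ===== CLAIM (what is proved, stated in full; the proofs are below) =====
def Claim_equal_limit_lines : Prop := ∀ (txt : String) (n : Int), Dom_limit_lines txt n → Spec_limit_lines txt n (limit_lines txt n)

-- ===== LEMMAS AND PROOFS =====

-- prefix kept by A's loop, as a function of the remaining budget n
def cutList : Int → List String → List String
  | _, [] => []
  | n, x :: xs =>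
    let m := if PySem.Str.strip x ≠ "" then n - 1 else n
    if m ≤ 0 then [x] else x :: cutList m xs

-- running counts starting from c
def countsFrom : List String → Int → List Int
  | [], _ => []
  | x :: xs, c =>
    let c' := if PySem.Str.strip x ≠ "" then c + 1 else c
    c' :: countsFrom xs c'

-- first index (as a Nat) whose count reaches n
def firstIdx (n : Int) : List Int → Option Nat
  | [] => none
  | c :: cs => if c ≥ n then some 0 else (firstIdx n cs).map (· + 1)

theorem loopA_eq (n : Int) (lines : List String) :
    ∀ (l : List String) (n0 : Int), limLoopA n lines l n0 = l ++ cutList (n - n0) lines := by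
  induction lines with
  | nil => intro l n0; simp [limLoopA, cutList]
  | cons x xs ih =>
    intro l n0
    by_cases h : PySem.Str.strip x ≠ ""
    · simp only [limLoopA, cutList]
      simp only [if_pos h]
      by_cases hb : n0 + 1 ≥ n
      · rw [if_pos hb, if_pos (by omega : n - n0 - 1 ≤ 0)]
      · rw [if_neg hb, if_neg (by omega : ¬ n - n0 - 1 ≤ 0), ih]
        have e : n - (n0 + 1) = n - n0 - 1 := by omega
        simp [e]
    · simp only [limLoopA, cutList]
      simp only [if_neg h]
      by_cases hb : n0 ≥ n
      · rw [if_pos hb, if_pos (by omega : n - n0 ≤ 0)]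
      · rw [if_neg hb, if_neg (by omega : ¬ n - n0 ≤ 0), ih]
        simp

theorem countsLoopB_eq (lines : List String) :
    ∀ (acc : List Int) (c : Int), countsLoopB lines acc c = acc ++ countsFrom lines c := by
  induction lines with
  | nil => intro acc c; simp [countsLoopB, countsFrom]
  | cons x xs ih =>
    intro acc c
    simp only [countsLoopB, countsFrom, ih]
    simp

theorem firstCutB_eq (n : Int) (cs : List Int) :
    ∀ (i : Int), firstCutB n cs i = (firstIdx n cs).map (fun (j : Nat) => i + (j : Int) + 1) := by
  induction cs with
  | nil => intro i; simp [firstCutB, firstIdx]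
  | cons c rest ih =>
    intro i
    by_cases h : c ≥ n
    · simp [firstCutB, firstIdx, h]
    · simp only [firstCutB, firstIdx, if_neg h, ih (i + 1)]
      cases firstIdx n rest
      · simp
      · simp; ring

theorem cutList_eq_take (lines : List String) :
    ∀ (n c : Int),
      cutList (n - c) lines =
        match firstIdx n (countsFrom lines c) with
        | some j => lines.take (j + 1)
        | none => lines := by
  induction lines with
  | nil => intro n c; simp [cutList, countsFrom, firstIdx]
  | cons x xs ih =>
    intro n c
    by_cases h : PySem.Str.strip x ≠ ""
    · simp only [cutList, countsFrom, firstIdx, if_pos h]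
      by_cases hb : c + 1 ≥ n
      · rw [if_pos hb, if_pos (by omega : n - c - 1 ≤ 0)]
        simp
      · rw [if_neg hb, if_neg (by omega : ¬ n - c - 1 ≤ 0)]
        have e : n - c - 1 = n - (c + 1) := by omega
        rw [e, ih n (c + 1)]
        cases firstIdx n (countsFrom xs (c + 1)) <;> simp
    · simp only [cutList, countsFrom, firstIdx, if_neg h]
      by_cases hb : c ≥ n
      · rw [if_pos hb, if_pos (by omega : n - c ≤ 0)]
        simp
      · rw [if_neg hb, if_neg (by omega : ¬ n - c ≤ 0), ih n c]
        cases firstIdx n (countsFrom xs c) <;> simp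

theorem cut_eq_slice (lines : List String) (n : Int) :
    limLoopA n lines [] 0 =
      PySem.List.slice lines none
        (some ((firstCutB n (countsLoopB lines [] 0) 0).getD (lines.length : Int))) := by
  rw [loopA_eq, countsLoopB_eq, firstCutB_eq]
  simp only [List.nil_append, sub_zero]
  have e : cutList (n - 0) lines = cutList n lines := by norm_num
  rw [← e, cutList_eq_take lines n 0]
  cases hj : firstIdx n (countsFrom lines 0) with
  | none =>
    simp only [Option.map_none, Option.getD_none]
    rw [PySem.List.slice_to lines (by omega : (0:Int) ≤ (lines.length : Int))]
    simp
  | some j =>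
    simp only [Option.map_some, Option.getD_some]
    rw [PySem.List.slice_to lines (by omega : (0:Int) ≤ 0 + (j:Int) + 1)]
    congr 1
    omega

-- ===== VERDICT (by name: the statement is the Claim_ definition above) =====
theorem limit_lines_spec : Claim_equal_limit_lines := by
  intro txt n _
  show limit_lines txt n = limit_lines_alt txt n
  unfold limit_lines limit_lines_alt
  exact congrArg (fun ls => PySem.Str.strip (PySem.Str.join "\n" ls))
    (cut_eq_slice ((PySem.Str.split? (PySem.Str.strip txt) "\n").getD []) n)
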